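-- pv_equiv track=rewrite | github.com/mrjury76/Ransomware-Analysis | extract_features.py | feat_svcscan
-- ===== SOURCE A (Python) =====
-- SECURITY_SERVICES = {"windefend", "msmpeng", "mbamlservice", "vsserv",
--                      "sophos", "mcafee", "vss", "swprv", "wbengine",
--                      "sqlwriter", "sqlbrowser", "mssqlserver"}
--
-- def feat_svcscan(rows):
--     if not rows:
--         return {}
--     # Vol3 svcscan duplicates entries across service tables -- deduplicate by
--     # (name, state) so that VSS/wbengine/swprv don't inflate counts on benign machines.
--     seen = set()
--     running = stopped = security_stopped = 0
--     for r in rows: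
--         state = r.get("State", "").strip().upper()
--         name  = r.get("Name", r.get("ServiceName", "")).strip().lower()
--         key   = (name, state)
--         if key in seen:
--             continue
--         seen.add(key)
--         if "RUNNING" in state:
--             running += 1
--         elif "STOPPED" in state:
--             stopped += 1
--             if any(svc in name for svc in SECURITY_SERVICES):
--                 security_stopped += 1
--     return {
--         "svcscan_total":            len(seen),
--         "svcscan_running":          running,
--         "svcscan_stopped":          stopped,
--         "svcscan_security_stopped": security_stopped,
--     }
-- ===== SOURCE B (Python) =====
-- SECURITY_SERVICES = {"windefend", "msmpeng", "mbamlservice", "vsserv",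
--                      "sophos", "mcafee", "vss", "swprv", "wbengine",
--                      "sqlwriter", "sqlbrowser", "mssqlserver"}
--
--
-- def _svc_category(name, state):
--     # classify one normalized (name, state) pair into a category code:
--     # 1 = running, 3 = stopped security service, 2 = other stopped, 0 = neither
--     if "RUNNING" in state:
--         return 1
--     if "STOPPED" in state:
--         return 3 if any(svc in name for svc in SECURITY_SERVICES) else 2
--     return 0
--
--
-- def feat_svcscan(rows):
--     if not rows:
--         return {}
--     # dict keyed by the normalized pair: overwriting dedupes, and the stored
--     # category depends only on the key, so duplicates never change a value
--     cat = {}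
--     for r in rows:
--         name = r.get("Name", r.get("ServiceName", "")).strip().lower()
--         state = r.get("State", "").strip().upper()
--         cat[(name, state)] = _svc_category(name, state)
--     # all four features are value-counts of the category-code list
--     vals = list(cat.values())
--     return {
--         "svcscan_total":            len(vals),
--         "svcscan_running":          vals.count(1),
--         "svcscan_stopped":          vals.count(2) + vals.count(3),
--         "svcscan_security_stopped": vals.count(3),
--     }
-- ===== Notes on version B (the rewrite author's own statement) =====
-- stated objective: alternative
-- what changed: A dedups with a seen-set while updating four branch accumulators in one stateful loop; B instead classifies each row into a category code (0/1/2/3) stored in a dict keyed by the normalized pair (overwrite = dedup, the code depends only on the key), and then reads all four features off as value-counts of the code list.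
import Mathlib
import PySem

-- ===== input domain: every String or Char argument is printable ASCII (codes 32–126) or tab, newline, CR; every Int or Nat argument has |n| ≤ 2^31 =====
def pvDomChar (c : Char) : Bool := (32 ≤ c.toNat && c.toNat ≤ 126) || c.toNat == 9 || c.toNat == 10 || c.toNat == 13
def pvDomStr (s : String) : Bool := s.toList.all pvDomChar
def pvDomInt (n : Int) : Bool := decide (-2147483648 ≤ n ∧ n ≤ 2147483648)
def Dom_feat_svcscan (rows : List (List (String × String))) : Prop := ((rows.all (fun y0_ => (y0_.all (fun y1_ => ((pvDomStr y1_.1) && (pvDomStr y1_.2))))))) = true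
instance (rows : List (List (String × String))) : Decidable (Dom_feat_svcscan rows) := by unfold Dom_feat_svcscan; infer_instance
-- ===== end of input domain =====

-- B replaces A's seen-set + four branch accumulators by a per-key category code stored in a
-- dict (overwrite = dedup) and reads the features off as value-counts ('alternative', same cost);
-- return value only — neither version mutates its input.

-- shared normalization helpers (identical expressions in both Pythons)
def svcSecurityServices : List String :=
  ["windefend", "msmpeng", "mbamlservice", "vsserv", "sophos", "mcafee",
   "vss", "swprv", "wbengine", "sqlwriter", "sqlbrowser", "mssqlserver"]

def svcIsSecurity (name : String) : Bool :=
  svcSecurityServices.any (fun svc => PySem.Str.isIn svc name)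

-- normalized (name, state) of one row: r.get fallbacks, strip, case-fold
def svcNorm (r : List (String × String)) : String × String :=
  ((PySem.Str.lower (PySem.Str.strip
      (PySem.Dict.getD (PySem.Dict.mk r) "Name"
        (PySem.Dict.getD (PySem.Dict.mk r) "ServiceName" "")))),
   (PySem.Str.upper (PySem.Str.strip
      (PySem.Dict.getD (PySem.Dict.mk r) "State" ""))))

-- ===== PORT A =====
-- A's loop body: dedup by key, then the RUNNING / STOPPED / security branches
def svcStep (acc : PySem.Set (String × String) × Int × Int × Int)
    (key : String × String) : PySem.Set (String × String) × Int × Int × Int :=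
  if PySem.Set.contains acc.1 key then acc
  else
    let seen := PySem.Set.add acc.1 key
    if PySem.Str.isIn "RUNNING" key.2 then (seen, acc.2.1 + 1, acc.2.2.1, acc.2.2.2)
    else if PySem.Str.isIn "STOPPED" key.2 then
      if svcIsSecurity key.1 then (seen, acc.2.1, acc.2.2.1 + 1, acc.2.2.2 + 1)
      else (seen, acc.2.1, acc.2.2.1 + 1, acc.2.2.2)
    else (seen, acc.2.1, acc.2.2.1, acc.2.2.2)

def feat_svcscan (rows : List (List (String × String))) : List (String × Int) :=
  if rows = [] then []
  else
    let fin := rows.foldl (fun acc r => svcStep acc (svcNorm r)) (PySem.Set.empty, 0, 0, 0)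
    [("svcscan_total", (PySem.Set.len fin.1 : Int)),
     ("svcscan_running", fin.2.1),
     ("svcscan_stopped", fin.2.2.1),
     ("svcscan_security_stopped", fin.2.2.2)]

-- ===== PORT B =====
-- B's classifier _svc_category: 1 running, 3 stopped security, 2 other stopped, 0 neither
def svcCategory (name state : String) : Int :=
  if PySem.Str.isIn "RUNNING" state then 1
  else if PySem.Str.isIn "STOPPED" state then
    if svcIsSecurity name then 3 else 2
  else 0

def feat_svcscan_alt (rows : List (List (String × String))) : List (String × Int) :=
  if rows = [] then []
  else
    let cat := rows.foldl (fun d r =>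
      let k := svcNorm r
      PySem.Dict.insert d k (svcCategory k.1 k.2))
      (PySem.Dict.empty : PySem.Dict (String × String) Int)
    let vals := PySem.Dict.values cat
    [("svcscan_total", (vals.length : Int)),
     ("svcscan_running", (PySem.List.count vals 1 : Int)),
     ("svcscan_stopped", ((PySem.List.count vals 2 : Int) + (PySem.List.count vals 3 : Int))),
     ("svcscan_security_stopped", (PySem.List.count vals 3 : Int))]

-- ===== PRECONDITION & SPEC =====
def Spec_feat_svcscan (rows : List (List (String × String))) (out : List (String × Int)) : Prop := out = feat_svcscan_alt rows
instance (rows : List (List (String × String))) (out : List (String × Int)) : Decidable (Spec_feat_svcscan rows out) := by unfold Spec_feat_svcscan; infer_instance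

-- ===== CLAIM (what is proved, stated in full; the proofs are below) =====
def Claim_equal_feat_svcscan : Prop := ∀ (rows : List (List (String × String))), Dom_feat_svcscan rows → Spec_feat_svcscan rows (feat_svcscan rows)

-- ===== LEMMAS AND PROOFS =====

-- the three count predicates of A's branches, on keys
def svcPR (k : String × String) : Bool := PySem.Str.isIn "RUNNING" k.2
def svcPS (k : String × String) : Bool := !svcPR k && PySem.Str.isIn "STOPPED" k.2
def svcPSec (k : String × String) : Bool := svcPS k && svcIsSecurity k.1

-- A's loop invariant: folding svcStep from (s, r, st, sec) extends the seen set by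
-- Set.update and adds the counts of the newly appended keys
lemma svcStep_foldl (ks : List (String × String)) (s : PySem.Set (String × String))
    (r st sec : Int) :
    ks.foldl svcStep (s, r, st, sec) =
      (PySem.Set.update s ks,
       r + (((PySem.Set.update s ks).drop s.length).countP svcPR : Int),
       st + (((PySem.Set.update s ks).drop s.length).countP svcPS : Int),
       sec + (((PySem.Set.update s ks).drop s.length).countP svcPSec : Int)) := by
  induction ks generalizing s r st sec with
  | nil => simp [PySem.Set.update_nil]
  | cons k ks ih =>
    by_cases hk : k ∈ s
    · have hstep : svcStep (s, r, st, sec) k = (s, r, st, sec) := by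
        simp [svcStep, hk]
      have hupd : PySem.Set.update s (k :: ks) = PySem.Set.update s ks := by
        rw [PySem.Set.update_cons, PySem.Set.add_of_mem hk]
      simp only [List.foldl_cons, hstep, hupd, ih]
    · have hadd : PySem.Set.add s k = s ++ [k] := PySem.Set.add_of_not_mem hk
      have hupd : PySem.Set.update s (k :: ks) = PySem.Set.update (s ++ [k]) ks := by
        rw [PySem.Set.update_cons, hadd]
      obtain ⟨rest, hrest⟩ : ∃ rest, PySem.Set.update (s ++ [k]) ks = (s ++ [k]) ++ rest :=
        ⟨_, PySem.Set.update_eq_append_filter (s ++ [k]) ks⟩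
      have hdrop1 : (PySem.Set.update (s ++ [k]) ks).drop (s ++ [k]).length = rest := by
        rw [hrest]; exact List.drop_left
      have hdrop0 : (PySem.Set.update (s ++ [k]) ks).drop s.length = k :: rest := by
        rw [hrest, List.append_assoc, List.drop_left]; simp
      have hcontains : PySem.Set.contains s k = false := by
        simpa [PySem.Set.contains_iff] using hk
      simp only [List.foldl_cons, svcStep, hcontains, Bool.false_eq_true, if_false, hadd]
      rcases hR : PySem.Str.isIn "RUNNING" k.2 with _ | _ <;>
        rcases hS : PySem.Str.isIn "STOPPED" k.2 with _ | _ <;>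
        rcases hSec : svcIsSecurity k.1 with _ | _ <;>
        simp only [hR, hS, hSec, Bool.false_eq_true, Bool.true_eq_false, if_true, if_false,
          ih, hupd, hdrop1, hdrop0, List.countP_cons, svcPR, svcPS, svcPSec,
          Bool.not_true, Bool.not_false, Bool.false_and, Bool.true_and,
          Bool.and_false, Bool.and_true, if_true, if_false, Prod.mk.injEq] <;>
        push_cast <;>
        exact ⟨by trivial, by ring, by ring, by ring⟩

-- B's loop invariant: a fold of insert (key a) (f (key a)) over a dict whose items already
-- pair each key with f of it keeps that shape, with the key set extended by Set.update
lemma items_foldl_insert_keyval {α κ ν : Type} [BEq κ] [LawfulBEq κ]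
    (l : List α) (key : α → κ) (f : κ → ν) (d : PySem.Dict κ ν)
    (hnd : d.keys.Nodup) (hit : d.items = d.keys.map (fun k => (k, f k))) :
    (l.foldl (fun d a => PySem.Dict.insert d (key a) (f (key a))) d).items
      = (PySem.Set.update d.keys (l.map key)).map (fun k => (k, f k)) := by
  induction l generalizing d with
  | nil => simpa [PySem.Set.update_nil] using hit
  | cons a l ih =>
    by_cases hk : key a ∈ d.keys
    · have hc : d.contains (key a) = true := (PySem.Dict.contains_iff_mem_keys _ _).2 hk
      have hitems : (d.insert (key a) (f (key a))).items = d.items := by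
        rw [PySem.Dict.items_insert_of_contains _ _ hc, hit, List.map_map]
        refine List.map_congr_left (fun k _ => ?_)
        by_cases h : k = key a
        · simp [h]
        · simp [Function.comp, h]
      have hkeys : (d.insert (key a) (f (key a))).keys = d.keys := by
        exact PySem.Dict.keys_insert_of_contains _ _ hc
      have hupd : PySem.Set.update d.keys ((a :: l).map key)
          = PySem.Set.update d.keys (l.map key) := by
        rw [List.map_cons, PySem.Set.update_cons, PySem.Set.add_of_mem hk]
      rw [List.foldl_cons, hupd]
      rw [ih _ (hkeys ▸ hnd) (by rw [hitems, hkeys, hit]), hkeys]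
    · have hc : d.contains (key a) = false := by
        rw [← Bool.not_eq_true]; exact fun h => hk ((PySem.Dict.contains_iff_mem_keys _ _).1 h)
      have hitems : (d.insert (key a) (f (key a))).items
          = (d.keys ++ [key a]).map (fun k => (k, f k)) := by
        rw [PySem.Dict.items_insert_of_not_contains _ _ hc, hit]; simp
      have hkeys : (d.insert (key a) (f (key a))).keys = d.keys ++ [key a] :=
        PySem.Dict.keys_insert_of_not_contains _ _ hc
      have hnd' : (d.keys ++ [key a]).Nodup := by
        refine List.Nodup.append hnd (List.nodup_singleton _) ?_
        simpa [List.disjoint_singleton] using hk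
      have hupd : PySem.Set.update d.keys ((a :: l).map key)
          = PySem.Set.update (d.keys ++ [key a]) (l.map key) := by
        rw [List.map_cons, PySem.Set.update_cons, PySem.Set.add_of_not_mem hk]
      rw [List.foldl_cons, hupd, ih _ (hkeys ▸ hnd') (by rw [hitems, hkeys]), hkeys]

-- pointwise: B's category code 1 / 3 / {2,3} matches A's three branch predicates
lemma svcCategory_eq_one (k : String × String) :
    (svcCategory k.1 k.2 == 1) = svcPR k := by
  unfold svcCategory svcPR
  rcases hR : PySem.Str.isIn "RUNNING" k.2 <;>
    rcases hS : PySem.Str.isIn "STOPPED" k.2 <;>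
    rcases hSec : svcIsSecurity k.1 <;> simp

lemma svcCategory_eq_three (k : String × String) :
    (svcCategory k.1 k.2 == 3) = svcPSec k := by
  unfold svcCategory svcPSec svcPS svcPR
  rcases hR : PySem.Str.isIn "RUNNING" k.2 <;>
    rcases hS : PySem.Str.isIn "STOPPED" k.2 <;>
    rcases hSec : svcIsSecurity k.1 <;> simp

lemma svcCategory_two_three (S : List (String × String)) :
    S.countP svcPS
      = S.countP (fun k => svcCategory k.1 k.2 == 2)
        + S.countP (fun k => svcCategory k.1 k.2 == 3) := by
  induction S with
  | nil => rfl
  | cons k S ih =>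
    simp only [List.countP_cons]
    have : (if svcPS k = true then 1 else 0)
        = ((if (svcCategory k.1 k.2 == 2) = true then 1 else 0)
            + (if (svcCategory k.1 k.2 == 3) = true then 1 else 0) : Nat) := by
      unfold svcCategory svcPS svcPR
      rcases hR : PySem.Str.isIn "RUNNING" k.2 <;>
        rcases hS : PySem.Str.isIn "STOPPED" k.2 <;>
        rcases hSec : svcIsSecurity k.1 <;> simp
    omega

-- ===== VERDICT (by name: the statement is the Claim_ definition above) =====
theorem feat_svcscan_spec : Claim_equal_feat_svcscan := by
  intro rows _
  unfold Spec_feat_svcscan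
  by_cases h : rows = []
  · simp [h, feat_svcscan, feat_svcscan_alt]
  · simp only [feat_svcscan, feat_svcscan_alt, if_neg h]
    -- A's side: fold of svcStep over the normalized keys
    have hfoldA : rows.foldl (fun acc r => svcStep acc (svcNorm r))
        ((PySem.Set.empty : PySem.Set (String × String)), (0 : Int), (0 : Int), (0 : Int))
        = (rows.map svcNorm).foldl svcStep (PySem.Set.empty, 0, 0, 0) := by
      rw [List.foldl_map]
    -- B's side: the dict's items pair each distinct key with its category
    have hitems : (rows.foldl (fun d r =>
          PySem.Dict.insert d (svcNorm r) (svcCategory (svcNorm r).1 (svcNorm r).2))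
          (PySem.Dict.empty : PySem.Dict (String × String) Int)).items
        = (PySem.Set.update [] (rows.map svcNorm)).map
            (fun k => (k, svcCategory k.1 k.2)) := by
      have := items_foldl_insert_keyval rows svcNorm
        (fun k => svcCategory k.1 k.2)
        (PySem.Dict.empty : PySem.Dict (String × String) Int)
        (by simp [PySem.Dict.keys_empty]) rfl
      simpa [PySem.Dict.keys_empty] using this
    have hvals : (rows.foldl (fun d r =>
          PySem.Dict.insert d (svcNorm r) (svcCategory (svcNorm r).1 (svcNorm r).2))
          (PySem.Dict.empty : PySem.Dict (String × String) Int)).values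
        = (PySem.Set.update [] (rows.map svcNorm)).map
            (fun k => svcCategory k.1 k.2) := by
      have hv : (rows.foldl (fun d r =>
          PySem.Dict.insert d (svcNorm r) (svcCategory (svcNorm r).1 (svcNorm r).2))
          (PySem.Dict.empty : PySem.Dict (String × String) Int)).values
          = (rows.foldl (fun d r =>
          PySem.Dict.insert d (svcNorm r) (svcCategory (svcNorm r).1 (svcNorm r).2))
          (PySem.Dict.empty : PySem.Dict (String × String) Int)).items.map (·.2) := rfl
      rw [hv, hitems, List.map_map]
      rfl
    rw [hfoldA, svcStep_foldl, show (PySem.Set.empty : PySem.Set (String × String)) = []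
      from rfl, hvals]
    simp only [List.length_nil, List.drop_zero, zero_add]
    have e1 : PySem.Set.len (PySem.Set.update [] (rows.map svcNorm))
        = (((PySem.Set.update [] (rows.map svcNorm)).map
            (fun k => svcCategory k.1 k.2)).length : Int) := by
      simp [pysem]
    have e2 : (((PySem.Set.update [] (rows.map svcNorm)).countP svcPR : Nat) : Int)
        = ((PySem.List.count ((PySem.Set.update [] (rows.map svcNorm)).map
            (fun k => svcCategory k.1 k.2)) 1 : Nat) : Int) := by
      rw [PySem.List.count_eq, List.count_eq_countP, List.countP_map]
      exact congrArg _ (List.countP_congr (fun k _ => by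
        rw [← svcCategory_eq_one k]; exact Iff.rfl))
    have e4 : (((PySem.Set.update [] (rows.map svcNorm)).countP svcPSec : Nat) : Int)
        = ((PySem.List.count ((PySem.Set.update [] (rows.map svcNorm)).map
            (fun k => svcCategory k.1 k.2)) 3 : Nat) : Int) := by
      rw [PySem.List.count_eq, List.count_eq_countP, List.countP_map]
      exact congrArg _ (List.countP_congr (fun k _ => by
        rw [← svcCategory_eq_three k]; exact Iff.rfl))
    have e3 : (((PySem.Set.update [] (rows.map svcNorm)).countP svcPS : Nat) : Int)
        = ((PySem.List.count ((PySem.Set.update [] (rows.map svcNorm)).map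
            (fun k => svcCategory k.1 k.2)) 2 : Nat) : Int)
          + ((PySem.List.count ((PySem.Set.update [] (rows.map svcNorm)).map
            (fun k => svcCategory k.1 k.2)) 3 : Nat) : Int) := by
      rw [PySem.List.count_eq, PySem.List.count_eq, List.count_eq_countP,
        List.count_eq_countP, List.countP_map, List.countP_map,
        svcCategory_two_three (PySem.Set.update [] (rows.map svcNorm))]
      push_cast
      rfl
    rw [e1, e2, e3, e4]
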